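-- pv_equiv track=rewrite | github.com/XiaojieGu/PAGE | model.py | rel_adj_create
-- ===== SOURCE A (Python) =====
-- def rel_adj_create(rel_adj,slen,window):
--     for i in range(slen):
--
--         for s in range(i+1,slen):
--             rel_adj[i][s] = 1
--
--     for i in range(slen):
--         num = 1
--         for o in range(i-1,-1,-2):
--             if((o-1)<0):
--                 rel_adj[i][o] = -num
--             else:
--                 rel_adj[i][o] = -num
--                 rel_adj[i][o-1] = -num
--             num+=1
--
--     for i in range(slen):
--         for o in range(i-1,-1,-1):
--             if(rel_adj[i][o]<-(window+1)):
--                 rel_adj[i][o] = - (window + 1)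
--
--     return rel_adj
-- ===== SOURCE B (Python) =====
-- def rel_adj_create(rel_adj, slen, window):
--     # One double loop with a closed-form value per cell (return value equals A's;
--     # mutates rel_adj in place like the original, final state identical).
--     for i in range(slen):
--         for j in range(slen):
--             if j > i:
--                 rel_adj[i][j] = 1
--             elif j < i:
--                 rel_adj[i][j] = -min((i - j + 1) // 2, window + 1)
--     return rel_adj
-- ===== Notes on version B (the rewrite author's own statement) =====
-- stated objective: simpler
-- what changed: Replaces A's three passes (upper-triangle fill, a step-2 pairing walk that assigns two columns per iteration with a running counter, and a separate capping scan) by one double loop that writes each sub-diagonal cell once from the closed form -min((i-j+1)//2, window+1).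
import Mathlib
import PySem

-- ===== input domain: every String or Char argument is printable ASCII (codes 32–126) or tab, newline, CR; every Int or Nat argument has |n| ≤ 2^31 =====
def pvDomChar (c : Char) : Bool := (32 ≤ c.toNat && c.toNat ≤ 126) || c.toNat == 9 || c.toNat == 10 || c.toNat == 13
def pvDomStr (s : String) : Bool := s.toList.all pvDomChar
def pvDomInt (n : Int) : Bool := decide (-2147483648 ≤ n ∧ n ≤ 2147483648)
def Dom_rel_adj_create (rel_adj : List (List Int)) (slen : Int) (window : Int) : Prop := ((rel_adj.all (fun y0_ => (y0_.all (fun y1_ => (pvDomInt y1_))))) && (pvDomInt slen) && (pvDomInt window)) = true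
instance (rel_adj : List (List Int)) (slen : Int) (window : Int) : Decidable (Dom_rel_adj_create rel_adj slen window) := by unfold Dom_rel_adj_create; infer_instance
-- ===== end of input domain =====

-- B replaces A's three passes by one double loop writing each cell below the diagonal the
-- closed form -min((i-j+1)//2, window+1); same return value, same final in-place state.

-- ===== PORT A =====
-- Python assignment rel_adj[i][j] = v (indices are in range on every input Pre_ admits)
def pvSetCell (m : List (List Int)) (i j v : Int) : List (List Int) :=
  m.set i.toNat ((m.getD i.toNat []).set j.toNat v)

def rel_adj_create (rel_adj : List (List Int)) (slen : Int) (window : Int) : List (List Int) :=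
  -- pass 1: upper triangle
  let m1 := (PySem.List.pyRange 0 slen 1).foldl (fun m i =>
    (PySem.List.pyRange (i+1) slen 1).foldl (fun m s => pvSetCell m i s 1) m) rel_adj
  -- pass 2: step -2 pairing walk, two columns per iteration, num counts up
  let m2 := (PySem.List.pyRange 0 slen 1).foldl (fun m i =>
    ((PySem.List.pyRange (i-1) (-1) (-2)).foldl
      (fun (p : List (List Int) × Int) o =>
        if o - 1 < 0 then (pvSetCell p.1 i o (-p.2), p.2 + 1)
        else (pvSetCell (pvSetCell p.1 i o (-p.2)) i (o - 1) (-p.2), p.2 + 1))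
      (m, 1)).1) m1
  -- pass 3: cap at -(window+1)
  (PySem.List.pyRange 0 slen 1).foldl (fun m i =>
    (PySem.List.pyRange (i-1) (-1) (-1)).foldl (fun m o =>
      if (m.getD i.toNat []).getD o.toNat 0 < -(window + 1)
      then pvSetCell m i o (-(window + 1)) else m) m) m2

-- ===== PORT B =====
def rel_adj_create_alt (rel_adj : List (List Int)) (slen : Int) (window : Int) : List (List Int) :=
  (PySem.List.pyRange 0 slen 1).foldl (fun m i =>
    (PySem.List.pyRange 0 slen 1).foldl (fun m j =>
      if i < j then pvSetCell m i j 1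
      else if j < i then
        pvSetCell m i j (-(min (PySem.Int.floordiv (i - j + 1) 2) (window + 1)))
      else m) m) rel_adj

-- ===== PRECONDITION & SPEC =====
-- Exactly the inputs on which Python A returns (no IndexError): for slen ≥ 2 the first
-- slen-1 rows must have length ≥ slen and row slen-1 length ≥ slen-1; for slen ≤ 1 A never indexes.
def Pre_rel_adj_create (rel_adj : List (List Int)) (slen : Int) (window : Int) : Prop :=
  slen ≤ 1 ∨ (slen ≤ (rel_adj.length : Int) ∧
    (∀ i ∈ List.range (slen.toNat - 1), slen ≤ ((rel_adj.getD i []).length : Int)) ∧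
    slen - 1 ≤ ((rel_adj.getD (slen.toNat - 1) []).length : Int))
instance (rel_adj : List (List Int)) (slen : Int) (window : Int) : Decidable (Pre_rel_adj_create rel_adj slen window) := by unfold Pre_rel_adj_create; infer_instance

def pvWitness_rel_adj_create : List (List Int) × Int × Int := ([[0,0,0],[0,0,0],[0,0]], 3, 1)

def Spec_rel_adj_create (rel_adj : List (List Int)) (slen : Int) (window : Int) (out : List (List Int)) : Prop := out = rel_adj_create_alt rel_adj slen window
instance (rel_adj : List (List Int)) (slen : Int) (window : Int) (out : List (List Int)) : Decidable (Spec_rel_adj_create rel_adj slen window out) := by unfold Spec_rel_adj_create; infer_instance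

-- ===== CLAIM (what is proved, stated in full; the proofs are below) =====
def Claim_equal_rel_adj_create : Prop := ∀ (rel_adj : List (List Int)) (slen : Int) (window : Int), Dom_rel_adj_create rel_adj slen window → Pre_rel_adj_create rel_adj slen window → Spec_rel_adj_create rel_adj slen window (rel_adj_create rel_adj slen window)

-- ===== LEMMAS AND PROOFS =====

-- The equality in fact holds for every input under the total Lean semantics of the ports
-- (List.set / List.getD are no-ops out of range), so Pre_ is not needed by the proof.

-- getD after set, in one formula
lemma getD_set_eq (r : List Int) (n j : Nat) (x : Int) :
    (r.set n x).getD j 0 = if n = j ∧ n < r.length then x else r.getD j 0 := by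
  simp only [List.getD_eq_getElem?_getD, List.getElem?_set]
  split_ifs with h1 h2 h3 <;> simp_all <;> omega

-- reading back a just-written row
lemma getD_set_self (m : List (List Int)) (n : Nat) (r : List Int) (h : n < m.length) :
    (m.set n r).getD n [] = r := by
  simp [List.getD_eq_getElem?_getD, h]

-- writing back the row a matrix already has is a no-op
lemma set_rowAt (m : List (List Int)) (n : Nat) :
    m.set n (m.getD n []) = m := by
  rcases Nat.lt_or_ge n m.length with h | h
  · rw [List.getD_eq_getElem _ _ h, List.set_getElem_self]
  · exact List.set_eq_of_length_le h

-- two rows of equal length agreeing on every getD are equal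
lemma eq_of_getD (r1 r2 : List Int) (hl : r1.length = r2.length)
    (h : ∀ j, r1.getD j 0 = r2.getD j 0) : r1 = r2 := by
  apply List.ext_getElem hl
  intro j hj1 hj2
  have := h j
  rwa [List.getD_eq_getElem _ _ hj1, List.getD_eq_getElem _ _ hj2] at this

-- a fold that only edits row n is the edit of row n by the folded row-level function
lemma foldl_set_row (l : List Int) (ru : List Int → Int → List Int) (n : Nat) :
    ∀ m : List (List Int),
      l.foldl (fun m o => m.set n (ru (m.getD n []) o)) m
        = m.set n (l.foldl ru (m.getD n [])) := by
  induction l with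
  | nil => intro m; exact (set_rowAt m n).symm
  | cons o l ih =>
    intro m
    simp only [List.foldl_cons]
    rw [ih]
    rcases Nat.lt_or_ge n m.length with h | h
    · rw [getD_set_self _ _ _ h, List.set_set]
    · rw [List.set_eq_of_length_le h, List.set_eq_of_length_le h,
        List.set_eq_of_length_le (by simpa using h)]

-- same, with the extra `num` counter threaded through (pass 2 of A)
def rowfold2 (ru : List Int → Int → Int → List Int) : List Int → Int → List Int → List Int
  | [], _, r => r
  | o :: l, c, r => rowfold2 ru l (c + 1) (ru r c o)

lemma rowfold2_append (ru : List Int → Int → Int → List Int) (l : List Int) (x : Int) :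
    ∀ (c : Int) (r : List Int),
      rowfold2 ru (l ++ [x]) c r = ru (rowfold2 ru l c r) (c + l.length) x := by
  induction l with
  | nil => intro c r; simp [rowfold2]
  | cons o l ih =>
    intro c r
    simp only [List.cons_append, rowfold2, ih, List.length_cons]
    congr 1
    push_cast
    ring

lemma foldl_set_row2 (l : List Int) (ru : List Int → Int → Int → List Int) (n : Nat) :
    ∀ (m : List (List Int)) (c : Int),
      l.foldl (fun (p : List (List Int) × Int) o =>
          (p.1.set n (ru (p.1.getD n []) p.2 o), p.2 + 1)) (m, c)
        = (m.set n (rowfold2 ru l c (m.getD n [])), c + l.length) := by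
  induction l with
  | nil =>
    intro m c
    simp only [rowfold2, List.length_nil, Nat.cast_zero, add_zero, List.foldl_nil]
    exact Prod.ext (set_rowAt m n).symm rfl
  | cons o l ih =>
    intro m c
    simp only [List.foldl_cons, rowfold2, List.length_cons]
    rw [ih]
    have hn : (c + (1 + (l.length : Int))) = c + 1 + (l.length : Int) := by ring
    rcases Nat.lt_or_ge n m.length with h | h
    · rw [getD_set_self _ _ _ h, List.set_set]
      push_cast
      exact Prod.ext rfl (by ring)
    · rw [List.set_eq_of_length_le h, List.set_eq_of_length_le h,
        List.set_eq_of_length_le (by simpa using h)]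
      push_cast
      exact Prod.ext rfl (by ring)

-- an outer loop over i that replaces row i by rf i (row i) is a mapIdx
lemma foldl_rows (rf : Int → List Int → List Int) (s : Int) :
    ∀ m : List (List Int),
      (PySem.List.pyRange 0 s 1).foldl
          (fun m i => m.set i.toNat (rf i (m.getD i.toNat []))) m
        = m.mapIdx (fun k row => if (k : Int) < s then rf (k : Int) row else row) := by
  by_cases hs : s ≤ 0
  · intro m
    rw [PySem.List.pyRange_one_eq_nil hs, List.foldl_nil]
    apply List.ext_getElem (by simp)
    intro k h1 h2
    rw [List.getElem_mapIdx, if_neg (by omega)]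
  · obtain ⟨N, rfl⟩ : ∃ N : Nat, s = (N : Int) :=
      ⟨s.toNat, (Int.toNat_of_nonneg (by omega)).symm⟩
    clear hs
    induction N with
    | zero =>
      intro m
      rw [PySem.List.pyRange_one_eq_nil (by norm_num), List.foldl_nil]
      apply List.ext_getElem (by simp)
      intro k h1 h2
      rw [List.getElem_mapIdx, if_neg (by omega)]
    | succ N ih =>
      intro m
      rw [show ((N + 1 : Nat) : Int) = (N : Int) + 1 by push_cast; ring,
        PySem.List.pyRange_one_succ_right (by positivity), List.foldl_append, ih]
      simp only [List.foldl_cons, List.foldl_nil, Int.toNat_natCast]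
      apply List.ext_getElem (by simp)
      intro k hk1 hk2
      have hk2' : k < m.length := by simpa using hk2
      rw [List.getElem_mapIdx]
      by_cases hk : k = N
      · subst hk
        rw [List.getElem_set_self (by simpa using hk2')]
        rw [List.getD_eq_getElem _ _ (by simpa using hk2'), List.getElem_mapIdx,
          if_neg (by omega), if_pos (by omega)]
      · rw [List.getElem_set_ne (by omega), List.getElem_mapIdx]
        by_cases hlt : (k : Int) < (N : Int)
        · rw [if_pos hlt, if_pos (by omega)]
        · rw [if_neg hlt, if_neg (by omega)]

-- the step -2 countdown range, as a map over List.range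
lemma pyRange_step2 (kN : Nat) :
    PySem.List.pyRange ((kN : Int) - 1) (-1) (-2)
      = (List.range ((kN + 1) / 2)).map (fun t : Nat => (kN : Int) - 1 + (-2) * (t : Int)) := by
  simp only [PySem.List.pyRange, if_neg (show ¬((-2:Int) = 0) by norm_num),
    if_neg (show ¬((0:Int) < -2) by norm_num)]
  have h : (if (-1:Int) < (kN:Int) - 1 then (((kN:Int) - 1 - -1 + - -2 - 1) / - -2).toNat else 0)
      = (kN + 1) / 2 := by
    have e : ((kN:Int) - 1 - -1 + - -2 - 1) / - -2 = ((kN:Int) + 1) / 2 := by norm_num; congr 1; ring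
    rw [e]
    split_ifs <;> omega
  rw [h]

-- pass 1 on one row: entries i+1 … i+n become 1
lemma R1 (kN : Nat) : ∀ (n : Nat) (row : List Int),
    ((((List.range n).map (fun t : Nat => (kN : Int) + 1 + (t : Int))).foldl
        (fun r j => r.set j.toNat 1) row).length = row.length)
  ∧ ∀ jN : Nat,
      (((List.range n).map (fun t : Nat => (kN : Int) + 1 + (t : Int))).foldl
        (fun r j => r.set j.toNat 1) row).getD jN 0
      = if kN < jN ∧ jN < kN + 1 + n ∧ jN < row.length then 1 else row.getD jN 0 := by
  intro n
  induction n with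
  | zero =>
    intro row
    simp only [List.range_zero, List.map_nil, List.foldl_nil]
    refine ⟨trivial, fun jN => ?_⟩
    rw [if_neg (by omega)]
  | succ n ih =>
    intro row
    obtain ⟨ihl, ihe⟩ := ih row
    rw [List.range_succ, List.map_append, List.foldl_append]
    simp only [List.map_cons, List.map_nil, List.foldl_cons, List.foldl_nil]
    rw [show (((kN : Int) + 1 + (n : Int)).toNat) = kN + 1 + n from by omega]
    refine ⟨by rw [List.length_set, ihl], fun jN => ?_⟩
    rw [getD_set_eq, ihl, ihe jN]
    split_ifs <;> first | rfl | omega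

-- pass 2 on one row: after n pairing steps the columns kN-2n … kN-1 hold -⌊(kN-j+1)/2⌋
lemma R2 (kN : Nat) : ∀ (n : Nat), n ≤ (kN + 1) / 2 → ∀ (row : List Int),
    ((rowfold2 (fun r c o => if o - 1 < 0 then r.set o.toNat (-c)
          else (r.set o.toNat (-c)).set (o - 1).toNat (-c))
        ((List.range n).map (fun t : Nat => (kN : Int) - 1 + (-2) * (t : Int))) 1 row).length
      = row.length)
  ∧ ∀ jN : Nat,
      (rowfold2 (fun r c o => if o - 1 < 0 then r.set o.toNat (-c)
          else (r.set o.toNat (-c)).set (o - 1).toNat (-c))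
        ((List.range n).map (fun t : Nat => (kN : Int) - 1 + (-2) * (t : Int))) 1 row).getD jN 0
      = if jN < kN ∧ kN ≤ jN + 2 * n ∧ jN < row.length
        then -(((kN : Int) - (jN : Int) + 1) / 2) else row.getD jN 0 := by
  intro n
  induction n with
  | zero =>
    intro _ row
    simp only [List.range_zero, List.map_nil, rowfold2]
    refine ⟨trivial, fun jN => ?_⟩
    rw [if_neg (by omega)]
  | succ n ih =>
    intro hn row
    obtain ⟨ihl, ihe⟩ := ih (by omega) row
    rw [List.range_succ, List.map_append]
    simp only [List.map_cons, List.map_nil]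
    rw [rowfold2_append]
    simp only [List.length_map, List.length_range]
    have ho : (0:Int) ≤ (kN : Int) - 1 + (-2) * (n : Int) := by omega
    by_cases hb : (kN : Int) - 1 + (-2) * (n : Int) - 1 < 0
    · rw [if_pos hb]
      rw [show ((kN : Int) - 1 + (-2) * (n : Int)).toNat = kN - 1 - 2 * n from by omega]
      refine ⟨by rw [List.length_set, ihl], fun jN => ?_⟩
      rw [getD_set_eq, ihl, ihe jN]
      split_ifs <;> first | rfl | omega
    · rw [if_neg hb]
      rw [show ((kN : Int) - 1 + (-2) * (n : Int)).toNat = kN - 1 - 2 * n from by omega,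
        show ((kN : Int) - 1 + (-2) * (n : Int) - 1).toNat = kN - 2 - 2 * n from by omega]
      refine ⟨by rw [List.length_set, List.length_set, ihl], fun jN => ?_⟩
      rw [getD_set_eq, List.length_set, getD_set_eq, ihl, ihe jN]
      split_ifs <;> first | rfl | omega

-- pass 3 on one row: the last n visited columns kN-n … kN-1 are capped at -(w+1)
lemma R3 (kN : Nat) (w : Int) : ∀ (n : Nat), n ≤ kN → ∀ (row : List Int),
    ((((List.range n).map (fun t : Nat => (kN : Int) - 1 - (t : Int))).foldl
        (fun r o => if r.getD o.toNat 0 < -(w + 1) then r.set o.toNat (-(w + 1)) else r)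
        row).length = row.length)
  ∧ ∀ jN : Nat,
      (((List.range n).map (fun t : Nat => (kN : Int) - 1 - (t : Int))).foldl
        (fun r o => if r.getD o.toNat 0 < -(w + 1) then r.set o.toNat (-(w + 1)) else r)
        row).getD jN 0
      = if kN - n ≤ jN ∧ jN < kN ∧ jN < row.length
        then (if row.getD jN 0 < -(w + 1) then -(w + 1) else row.getD jN 0)
        else row.getD jN 0 := by
  intro n
  induction n with
  | zero =>
    intro _ row
    simp only [List.range_zero, List.map_nil, List.foldl_nil]
    refine ⟨trivial, fun jN => ?_⟩
    rw [if_neg (by omega)]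
  | succ n ih =>
    intro hn row
    obtain ⟨ihl, ihe⟩ := ih (by omega) row
    rw [List.range_succ, List.map_append, List.foldl_append]
    simp only [List.map_cons, List.map_nil, List.foldl_cons, List.foldl_nil]
    rw [show (((kN : Int) - 1 - (n : Int)).toNat) = kN - 1 - n from by omega]
    have hcond : ¬(kN - n ≤ kN - 1 - n ∧ kN - 1 - n < kN ∧ kN - 1 - n < row.length) := by
      omega
    rw [ihe (kN - 1 - n), if_neg hcond]
    by_cases hc : row.getD (kN - 1 - n) 0 < -(w + 1)
    · rw [if_pos hc]
      refine ⟨by rw [List.length_set, ihl], fun jN => ?_⟩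
      rw [getD_set_eq, ihl, ihe jN]
      by_cases hj : kN - 1 - n = jN
      · subst hj; split_ifs <;> first | rfl | omega
      · split_ifs <;> first | rfl | omega
    · rw [if_neg hc]
      refine ⟨ihl, fun jN => ?_⟩
      rw [ihe jN]
      by_cases hj : kN - 1 - n = jN
      · subst hj; split_ifs <;> first | rfl | omega
      · split_ifs <;> first | rfl | omega

-- B's single loop on one row
lemma RB (kN : Nat) (w : Int) : ∀ (n : Nat) (row : List Int),
    ((((List.range n).map (fun t : Nat => (0 : Int) + (t : Int))).foldl
        (fun r j => if (kN : Int) < j then r.set j.toNat 1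
          else if j < (kN : Int) then
            r.set j.toNat (-(min (PySem.Int.floordiv ((kN : Int) - j + 1) 2) (w + 1)))
          else r) row).length = row.length)
  ∧ ∀ jN : Nat,
      (((List.range n).map (fun t : Nat => (0 : Int) + (t : Int))).foldl
        (fun r j => if (kN : Int) < j then r.set j.toNat 1
          else if j < (kN : Int) then
            r.set j.toNat (-(min (PySem.Int.floordiv ((kN : Int) - j + 1) 2) (w + 1)))
          else r) row).getD jN 0
      = if jN < n ∧ jN < row.length
        then (if kN < jN then 1
          else if jN < kN then -(min (((kN : Int) - (jN : Int) + 1) / 2) (w + 1))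
          else row.getD jN 0)
        else row.getD jN 0 := by
  intro n
  induction n with
  | zero =>
    intro row
    simp only [List.range_zero, List.map_nil, List.foldl_nil]
    refine ⟨trivial, fun jN => ?_⟩
    rw [if_neg (by omega)]
  | succ n ih =>
    intro row
    obtain ⟨ihl, ihe⟩ := ih row
    rw [List.range_succ, List.map_append, List.foldl_append]
    simp only [List.map_cons, List.map_nil, List.foldl_cons, List.foldl_nil]
    rw [show ((0 : Int) + (n : Int)) = (n : Int) from by omega]
    by_cases h1 : (kN : Int) < (n : Int)
    · rw [if_pos h1, show ((n : Int).toNat) = n from by omega]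
      refine ⟨by rw [List.length_set, ihl], fun jN => ?_⟩
      rw [getD_set_eq, ihl, ihe jN]
      split_ifs <;> first | rfl | omega
    · rw [if_neg h1]
      by_cases h2 : (n : Int) < (kN : Int)
      · rw [if_pos h2, show ((n : Int).toNat) = n from by omega]
        rw [PySem.Int.floordiv_eq_ediv_of_pos (by norm_num)]
        refine ⟨by rw [List.length_set, ihl], fun jN => ?_⟩
        rw [getD_set_eq, ihl, ihe jN]
        split_ifs <;> first | rfl | omega
      · rw [if_neg h2]
        refine ⟨ihl, fun jN => ?_⟩
        rw [ihe jN]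
        have hnk : n = kN := by omega
        split_ifs <;> first | rfl | omega

-- pass 1 as a per-row edit
lemma passA1 (s : Int) (m : List (List Int)) :
    (PySem.List.pyRange 0 s 1).foldl (fun m i =>
        (PySem.List.pyRange (i + 1) s 1).foldl (fun m s' => pvSetCell m i s' 1) m) m
    = m.mapIdx (fun k row => if (k : Int) < s then
        (PySem.List.pyRange ((k : Int) + 1) s 1).foldl (fun r j => r.set j.toNat 1) row
      else row) := by
  have h : (fun (m : List (List Int)) (i : Int) =>
        (PySem.List.pyRange (i + 1) s 1).foldl (fun m s' => pvSetCell m i s' 1) m)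
      = (fun m i => m.set i.toNat
          ((fun (i : Int) (r : List Int) =>
            (PySem.List.pyRange (i + 1) s 1).foldl (fun r j => r.set j.toNat 1) r)
            i (m.getD i.toNat []))) := by
    funext m i
    exact foldl_set_row (PySem.List.pyRange (i + 1) s 1) (fun r j => r.set j.toNat 1) i.toNat m
  rw [h]
  exact foldl_rows (fun i r =>
    (PySem.List.pyRange (i + 1) s 1).foldl (fun r j => r.set j.toNat 1) r) s m

-- one step of pass 2 only edits row i
lemma step2_shape (i o c : Int) (m : List (List Int)) :
    (if o - 1 < 0 then (pvSetCell m i o (-c), c + 1)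
      else (pvSetCell (pvSetCell m i o (-c)) i (o - 1) (-c), c + 1))
    = (m.set i.toNat ((fun (r : List Int) (c o : Int) =>
          if o - 1 < 0 then r.set o.toNat (-c)
          else (r.set o.toNat (-c)).set (o - 1).toNat (-c)) (m.getD i.toNat []) c o),
        c + 1) := by
  dsimp only
  split_ifs with h
  · rfl
  · simp only [pvSetCell]
    rcases Nat.lt_or_ge i.toNat m.length with hl | hl
    · rw [getD_set_self _ _ _ hl, List.set_set]
    · simp [List.set_eq_of_length_le hl]

-- pass 2 as a per-row edit
lemma passA2 (s : Int) (m : List (List Int)) :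
    (PySem.List.pyRange 0 s 1).foldl (fun m i =>
        ((PySem.List.pyRange (i - 1) (-1) (-2)).foldl
          (fun (p : List (List Int) × Int) o =>
            if o - 1 < 0 then (pvSetCell p.1 i o (-p.2), p.2 + 1)
            else (pvSetCell (pvSetCell p.1 i o (-p.2)) i (o - 1) (-p.2), p.2 + 1))
          (m, 1)).1) m
    = m.mapIdx (fun k row => if (k : Int) < s then
        rowfold2 (fun r c o => if o - 1 < 0 then r.set o.toNat (-c)
          else (r.set o.toNat (-c)).set (o - 1).toNat (-c))
          (PySem.List.pyRange ((k : Int) - 1) (-1) (-2)) 1 row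
      else row) := by
  have h : (fun (m : List (List Int)) (i : Int) =>
        ((PySem.List.pyRange (i - 1) (-1) (-2)).foldl
          (fun (p : List (List Int) × Int) o =>
            if o - 1 < 0 then (pvSetCell p.1 i o (-p.2), p.2 + 1)
            else (pvSetCell (pvSetCell p.1 i o (-p.2)) i (o - 1) (-p.2), p.2 + 1))
          (m, 1)).1)
      = (fun m i => m.set i.toNat
          ((fun (i : Int) (r : List Int) =>
            rowfold2 (fun r c o => if o - 1 < 0 then r.set o.toNat (-c)
              else (r.set o.toNat (-c)).set (o - 1).toNat (-c))
              (PySem.List.pyRange (i - 1) (-1) (-2)) 1 r)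
            i (m.getD i.toNat []))) := by
    funext m i
    have hs : (fun (p : List (List Int) × Int) (o : Int) =>
          if o - 1 < 0 then (pvSetCell p.1 i o (-p.2), p.2 + 1)
          else (pvSetCell (pvSetCell p.1 i o (-p.2)) i (o - 1) (-p.2), p.2 + 1))
        = (fun p o => (p.1.set i.toNat
            ((fun (r : List Int) (c o : Int) =>
              if o - 1 < 0 then r.set o.toNat (-c)
              else (r.set o.toNat (-c)).set (o - 1).toNat (-c)) (p.1.getD i.toNat []) p.2 o),
            p.2 + 1)) := by
      funext p o
      exact step2_shape i o p.2 p.1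
    rw [hs]
    exact congrArg Prod.fst (foldl_set_row2 (PySem.List.pyRange (i - 1) (-1) (-2))
      (fun r c o => if o - 1 < 0 then r.set o.toNat (-c)
        else (r.set o.toNat (-c)).set (o - 1).toNat (-c)) i.toNat m 1)
  rw [h]
  exact foldl_rows (fun i r =>
    rowfold2 (fun r c o => if o - 1 < 0 then r.set o.toNat (-c)
      else (r.set o.toNat (-c)).set (o - 1).toNat (-c))
      (PySem.List.pyRange (i - 1) (-1) (-2)) 1 r) s m

-- pass 3 as a per-row edit
lemma passA3 (s w : Int) (m : List (List Int)) :
    (PySem.List.pyRange 0 s 1).foldl (fun m i =>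
        (PySem.List.pyRange (i - 1) (-1) (-1)).foldl (fun m o =>
          if (m.getD i.toNat []).getD o.toNat 0 < -(w + 1)
          then pvSetCell m i o (-(w + 1)) else m) m) m
    = m.mapIdx (fun k row => if (k : Int) < s then
        (PySem.List.pyRange ((k : Int) - 1) (-1) (-1)).foldl (fun r o =>
          if r.getD o.toNat 0 < -(w + 1) then r.set o.toNat (-(w + 1)) else r) row
      else row) := by
  have h : (fun (m : List (List Int)) (i : Int) =>
        (PySem.List.pyRange (i - 1) (-1) (-1)).foldl (fun m o =>
          if (m.getD i.toNat []).getD o.toNat 0 < -(w + 1)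
          then pvSetCell m i o (-(w + 1)) else m) m)
      = (fun m i => m.set i.toNat
          ((fun (i : Int) (r : List Int) =>
            (PySem.List.pyRange (i - 1) (-1) (-1)).foldl (fun r o =>
              if r.getD o.toNat 0 < -(w + 1) then r.set o.toNat (-(w + 1)) else r) r)
            i (m.getD i.toNat []))) := by
    funext m i
    have hs : (fun (m : List (List Int)) (o : Int) =>
          if (m.getD i.toNat []).getD o.toNat 0 < -(w + 1)
          then pvSetCell m i o (-(w + 1)) else m)
        = (fun m o => m.set i.toNat
            ((fun (r : List Int) (o : Int) =>
              if r.getD o.toNat 0 < -(w + 1) then r.set o.toNat (-(w + 1)) else r)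
              (m.getD i.toNat []) o)) := by
      funext m o
      dsimp only
      split_ifs with hc
      · rfl
      · exact (set_rowAt m i.toNat).symm
    rw [hs]
    exact foldl_set_row (PySem.List.pyRange (i - 1) (-1) (-1))
      (fun r o => if r.getD o.toNat 0 < -(w + 1) then r.set o.toNat (-(w + 1)) else r) i.toNat m
  rw [h]
  exact foldl_rows (fun i r =>
    (PySem.List.pyRange (i - 1) (-1) (-1)).foldl (fun r o =>
      if r.getD o.toNat 0 < -(w + 1) then r.set o.toNat (-(w + 1)) else r) r) s m

-- B's loop as a per-row edit
lemma passB (s w : Int) (m : List (List Int)) :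
    (PySem.List.pyRange 0 s 1).foldl (fun m i =>
        (PySem.List.pyRange 0 s 1).foldl (fun m j =>
          if i < j then pvSetCell m i j 1
          else if j < i then
            pvSetCell m i j (-(min (PySem.Int.floordiv (i - j + 1) 2) (w + 1)))
          else m) m) m
    = m.mapIdx (fun k row => if (k : Int) < s then
        (PySem.List.pyRange 0 s 1).foldl (fun r j =>
          if (k : Int) < j then r.set j.toNat 1
          else if j < (k : Int) then
            r.set j.toNat (-(min (PySem.Int.floordiv ((k : Int) - j + 1) 2) (w + 1)))
          else r) row
      else row) := by
  have h : (fun (m : List (List Int)) (i : Int) =>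
        (PySem.List.pyRange 0 s 1).foldl (fun m j =>
          if i < j then pvSetCell m i j 1
          else if j < i then
            pvSetCell m i j (-(min (PySem.Int.floordiv (i - j + 1) 2) (w + 1)))
          else m) m)
      = (fun m i => m.set i.toNat
          ((fun (i : Int) (r : List Int) =>
            (PySem.List.pyRange 0 s 1).foldl (fun r j =>
              if i < j then r.set j.toNat 1
              else if j < i then
                r.set j.toNat (-(min (PySem.Int.floordiv (i - j + 1) 2) (w + 1)))
              else r) r)
            i (m.getD i.toNat []))) := by
    funext m i
    have hs : (fun (m : List (List Int)) (j : Int) =>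
          if i < j then pvSetCell m i j 1
          else if j < i then
            pvSetCell m i j (-(min (PySem.Int.floordiv (i - j + 1) 2) (w + 1)))
          else m)
        = (fun m j => m.set i.toNat
            ((fun (r : List Int) (j : Int) =>
              if i < j then r.set j.toNat 1
              else if j < i then
                r.set j.toNat (-(min (PySem.Int.floordiv (i - j + 1) 2) (w + 1)))
              else r)
              (m.getD i.toNat []) j)) := by
      funext m j
      dsimp only
      split_ifs with h1 h2
      · rfl
      · rfl
      · exact (set_rowAt m i.toNat).symm
    rw [hs]
    exact foldl_set_row (PySem.List.pyRange 0 s 1)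
      (fun r j => if i < j then r.set j.toNat 1
        else if j < i then
          r.set j.toNat (-(min (PySem.Int.floordiv (i - j + 1) 2) (w + 1)))
        else r) i.toNat m
  rw [h]
  exact foldl_rows (fun i r =>
    (PySem.List.pyRange 0 s 1).foldl (fun r j =>
      if i < j then r.set j.toNat 1
      else if j < i then
        r.set j.toNat (-(min (PySem.Int.floordiv (i - j + 1) 2) (w + 1)))
      else r) r) s m

-- the per-row equality of A's three passes and B's loop, for a row index k < slen
lemma row_main (kN : Nat) (s w : Int) (hks : (kN : Int) < s) (row : List Int) :
    (PySem.List.pyRange ((kN : Int) - 1) (-1) (-1)).foldl (fun r o =>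
        if r.getD o.toNat 0 < -(w + 1) then r.set o.toNat (-(w + 1)) else r)
      (rowfold2 (fun r c o => if o - 1 < 0 then r.set o.toNat (-c)
          else (r.set o.toNat (-c)).set (o - 1).toNat (-c))
        (PySem.List.pyRange ((kN : Int) - 1) (-1) (-2)) 1
        ((PySem.List.pyRange ((kN : Int) + 1) s 1).foldl (fun r j => r.set j.toNat 1) row))
    = (PySem.List.pyRange 0 s 1).foldl (fun r j =>
        if (kN : Int) < j then r.set j.toNat 1
        else if j < (kN : Int) then
          r.set j.toNat (-(min (PySem.Int.floordiv ((kN : Int) - j + 1) 2) (w + 1)))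
        else r) row := by
  rw [PySem.List.pyRange_one ((kN : Int) + 1) s, pyRange_step2, PySem.List.pyRange_neg_one,
    PySem.List.pyRange_one 0 s,
    show (((kN : Int) - 1) - (-1)).toNat = kN from by omega,
    show (s - 0).toNat = s.toNat from by omega]
  obtain ⟨l1, e1⟩ := R1 kN (s - ((kN : Int) + 1)).toNat row
  obtain ⟨l2, e2⟩ := R2 kN ((kN + 1) / 2) (le_refl _)
    (((List.range (s - ((kN : Int) + 1)).toNat).map
      (fun t : Nat => (kN : Int) + 1 + (t : Int))).foldl (fun r j => r.set j.toNat 1) row)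
  obtain ⟨l3, e3⟩ := R3 kN w kN (le_refl _)
    (rowfold2 (fun r c o => if o - 1 < 0 then r.set o.toNat (-c)
        else (r.set o.toNat (-c)).set (o - 1).toNat (-c))
      ((List.range ((kN + 1) / 2)).map (fun t : Nat => (kN : Int) - 1 + (-2) * (t : Int))) 1
      (((List.range (s - ((kN : Int) + 1)).toNat).map
        (fun t : Nat => (kN : Int) + 1 + (t : Int))).foldl (fun r j => r.set j.toNat 1) row))
  obtain ⟨lB, eB⟩ := RB kN w s.toNat row
  apply eq_of_getD _ _ (by rw [l3, l2, l1, lB])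
  intro j
  rw [e3 j, l2, l1, e2 j, l1, e1 j, eB j]
  split_ifs <;> first | rfl | omega

-- ===== VERDICT (by name: the statement is the Claim_ definition above) =====
theorem rel_adj_create_spec : Claim_equal_rel_adj_create := by
  intro m s w _ _
  unfold Spec_rel_adj_create
  simp only [rel_adj_create, rel_adj_create_alt]
  rw [passA1, passA2, passA3 s w, passB]
  apply List.ext_getElem (by simp)
  intro k hk1 hk2
  simp only [List.getElem_mapIdx]
  by_cases hks : (k : Int) < s
  · rw [if_pos hks, if_pos hks, if_pos hks, if_pos hks]
    exact row_main k s w hks _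
  · rw [if_neg hks, if_neg hks, if_neg hks, if_neg hks]
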